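-- pv_equiv track=rewrite | github.com/vosslab/biology-problems | table_curve_lib.py | _build_row_sequence
-- ===== SOURCE A (Python) =====
-- def _build_row_sequence(
-- 	n: int, row_heights: list, show_crosshairs: bool, sep_px: int
-- ) -> list:
-- 	"""Build row rendering sequence top-to-bottom.
--
-- 	Returns list of (kind, index, height_px) tuples where kind is
-- 	'data' or 'sep'. Data rows use 1-indexed row numbers; separator
-- 	rows use the transition index they represent.
-- 	"""
-- 	seq = []
-- 	# Walk transitions from highest (top) to lowest (bottom)
-- 	for i in range(n - 1, -1, -1):
-- 		tl_row = 2 * n - 2 * i - 1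
-- 		br_row = 2 * n - 2 * i
-- 		# TL arc row (upper half of sigmoid)
-- 		seq.append(('data', tl_row, row_heights[tl_row - 1]))
-- 		# Separator row at transition boundary
-- 		if show_crosshairs:
-- 			seq.append(('sep', i, sep_px))
-- 		# BR arc row (lower half of sigmoid)
-- 		seq.append(('data', br_row, row_heights[br_row - 1]))
-- 		# Buffer separator between consecutive transitions
-- 		if show_crosshairs and i > 0:
-- 			seq.append(('buf', i - 1, sep_px))
-- 	return seq
-- ===== SOURCE B (Python) =====
-- def _build_row_sequence(
-- 	n: int, row_heights: list, show_crosshairs: bool, sep_px: int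
-- ) -> list:
-- 	"""Closed-form positional construction: every output slot j of the
-- 	final sequence is computed directly from j, with no append/branch
-- 	sequencing.  Without crosshairs the output is just the 2n data rows;
-- 	with crosshairs it has 4n-1 slots: data rows at even j, separators at
-- 	odd j (gap k = j//2: 'sep' for even k, 'buf' for odd k)."""
-- 	if not show_crosshairs:
-- 		return [('data', r + 1, row_heights[r]) for r in range(2 * n)]
--
-- 	def item(j):
-- 		if j % 2 == 0:
-- 			r = j // 2
-- 			return ('data', r + 1, row_heights[r])
-- 		k = j // 2
-- 		if k % 2 == 0:
-- 			return ('sep', n - 1 - k // 2, sep_px)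
-- 		return ('buf', n - 1 - (k + 1) // 2, sep_px)
--
-- 	return [item(j) for j in range(4 * n - 1)]
-- ===== Notes on version B (the rewrite author's own statement) =====
-- stated objective: alternative
-- what changed: B abandons A's sequential transition loop with conditional appends and instead computes the output by a closed-form position formula: each slot j of the final list (4n-1 slots with crosshairs, 2n without) is mapped directly to its tuple from j's parity and j//2, so no append ordering or per-iteration branching remains.
import Mathlib
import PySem

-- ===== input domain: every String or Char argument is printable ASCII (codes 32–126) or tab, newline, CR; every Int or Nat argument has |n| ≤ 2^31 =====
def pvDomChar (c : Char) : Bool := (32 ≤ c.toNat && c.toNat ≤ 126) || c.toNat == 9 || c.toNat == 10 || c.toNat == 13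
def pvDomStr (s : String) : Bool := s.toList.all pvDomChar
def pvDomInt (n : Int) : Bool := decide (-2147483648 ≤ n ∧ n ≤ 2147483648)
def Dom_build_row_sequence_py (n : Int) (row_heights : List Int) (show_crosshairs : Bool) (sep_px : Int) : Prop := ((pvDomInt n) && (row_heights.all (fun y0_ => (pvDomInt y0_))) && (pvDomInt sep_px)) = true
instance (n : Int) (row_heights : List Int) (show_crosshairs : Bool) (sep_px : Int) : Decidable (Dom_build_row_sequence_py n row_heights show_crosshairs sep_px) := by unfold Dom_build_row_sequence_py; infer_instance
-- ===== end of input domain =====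

-- B replaces A's sequential transition loop with conditional appends by a
-- closed-form positional construction: each output slot j is computed directly
-- from j's parity and j//2 (objective: alternative).

-- ===== PORT A =====
def build_row_sequence_py (n : Int) (row_heights : List Int) (show_crosshairs : Bool) (sep_px : Int) : List (String × Int × Int) :=
  (PySem.List.pyRange (n - 1) (-1) (-1)).foldl (fun seq i =>
    let tl_row := 2 * n - 2 * i - 1
    let br_row := 2 * n - 2 * i
    let seq := seq ++ [("data", tl_row, PySem.List.pyGetD row_heights (tl_row - 1) 0)]
    let seq := if show_crosshairs then seq ++ [("sep", i, sep_px)] else seq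
    let seq := seq ++ [("data", br_row, PySem.List.pyGetD row_heights (br_row - 1) 0)]
    if show_crosshairs ∧ 0 < i then seq ++ [("buf", i - 1, sep_px)] else seq) []

-- ===== PORT B =====
-- B's per-slot closed form: the tuple at output position j.
def pvItem (n : Int) (row_heights : List Int) (sep_px : Int) (j : Int) : String × Int × Int :=
  if PySem.Int.mod j 2 = 0 then
    let r := PySem.Int.floordiv j 2
    ("data", r + 1, PySem.List.pyGetD row_heights r 0)
  else
    let k := PySem.Int.floordiv j 2
    if PySem.Int.mod k 2 = 0 then ("sep", n - 1 - PySem.Int.floordiv k 2, sep_px)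
    else ("buf", n - 1 - PySem.Int.floordiv (k + 1) 2, sep_px)

def build_row_sequence_py_alt (n : Int) (row_heights : List Int) (show_crosshairs : Bool) (sep_px : Int) : List (String × Int × Int) :=
  if !show_crosshairs then
    (PySem.List.pyRange 0 (2 * n) 1).map (fun r => ("data", r + 1, PySem.List.pyGetD row_heights r 0))
  else
    (PySem.List.pyRange 0 (4 * n - 1) 1).map (pvItem n row_heights sep_px)

-- ===== PRECONDITION & SPEC =====
-- Pre_ excludes exactly the inputs where both Pythons raise IndexError:
-- n ≥ 1 with fewer than 2n row heights.
def Pre_build_row_sequence_py (n : Int) (row_heights : List Int) (show_crosshairs : Bool) (sep_px : Int) : Prop :=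
  n ≤ 0 ∨ 2 * n ≤ (row_heights.length : Int)
instance (n : Int) (row_heights : List Int) (show_crosshairs : Bool) (sep_px : Int) : Decidable (Pre_build_row_sequence_py n row_heights show_crosshairs sep_px) := by unfold Pre_build_row_sequence_py; infer_instance

def pvWitness_build_row_sequence_py : Int × List Int × Bool × Int := (2, [3, 4, 5, 6], true, 1)

def Spec_build_row_sequence_py (n : Int) (row_heights : List Int) (show_crosshairs : Bool) (sep_px : Int) (out : List (String × Int × Int)) : Prop := out = build_row_sequence_py_alt n row_heights show_crosshairs sep_px
instance (n : Int) (row_heights : List Int) (show_crosshairs : Bool) (sep_px : Int) (out : List (String × Int × Int)) : Decidable (Spec_build_row_sequence_py n row_heights show_crosshairs sep_px out) := by unfold Spec_build_row_sequence_py; infer_instance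

-- ===== CLAIM (what is proved, stated in full; the proofs are below) =====
def Claim_equal_build_row_sequence_py : Prop := ∀ (n : Int) (row_heights : List Int) (show_crosshairs : Bool) (sep_px : Int), Dom_build_row_sequence_py n row_heights show_crosshairs sep_px → Pre_build_row_sequence_py n row_heights show_crosshairs sep_px → Spec_build_row_sequence_py n row_heights show_crosshairs sep_px (build_row_sequence_py n row_heights show_crosshairs sep_px)

-- ===== LEMMAS AND PROOFS =====

-- A's per-transition emission, as a standalone block.
def pvBlockA (n : Int) (row_heights : List Int) (show_crosshairs : Bool) (sep_px : Int) (i : Int) : List (String × Int × Int) :=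
  ([("data", 2 * n - 2 * i - 1, PySem.List.pyGetD row_heights (2 * n - 2 * i - 1 - 1) 0)]
    ++ (if show_crosshairs then [("sep", i, sep_px)] else []))
    ++ ([("data", 2 * n - 2 * i, PySem.List.pyGetD row_heights (2 * n - 2 * i - 1) 0)]
    ++ (if show_crosshairs ∧ 0 < i then [("buf", i - 1, sep_px)] else []))

theorem pv_foldl_emit {α β : Type} (g : β → List α) (l : List β) (acc : List α)
    (step : List α → β → List α) (h : ∀ a i, step a i = a ++ g i) :
    l.foldl step acc = acc ++ l.flatMap g := by
  induction l generalizing acc with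
  | nil => simp
  | cons x xs ih => simp [h, ih, List.flatMap_cons]

theorem pvA_eq_flatMap (n : Int) (row_heights : List Int) (show_crosshairs : Bool) (sep_px : Int) :
    build_row_sequence_py n row_heights show_crosshairs sep_px
      = (PySem.List.pyRange (n - 1) (-1) (-1)).flatMap (pvBlockA n row_heights show_crosshairs sep_px) := by
  unfold build_row_sequence_py
  rw [pv_foldl_emit (pvBlockA n row_heights show_crosshairs sep_px)]
  · simp
  · intro a i
    simp only [pvBlockA]
    by_cases h1 : show_crosshairs <;> by_cases h2 : (0:Int) < i <;>
      simp [h1, h2]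

-- values of pvItem at the four positions of transition i (i = n-1-… comes out of
-- the j-arithmetic; stated with j given explicitly)
theorem pvItem_data (n : Int) (rh : List Int) (sp : Int) (j : Int)
    (h : ∃ r : Int, j = 2 * r) :
    pvItem n rh sp j = ("data", PySem.Int.floordiv j 2 + 1, PySem.List.pyGetD rh (PySem.Int.floordiv j 2) 0) := by
  obtain ⟨r, rfl⟩ := h
  have h0 : PySem.Int.mod (2 * r) 2 = 0 := by
    rw [PySem.Int.mod_eq_emod_of_pos (by omega : (0:Int) < 2)]; omega
  simp only [pvItem, h0]
  simp

theorem pvItem_sep (n : Int) (rh : List Int) (sp : Int) (j : Int)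
    (h : ∃ k : Int, j = 4 * k + 1) :
    pvItem n rh sp j = ("sep", n - 1 - PySem.Int.floordiv (PySem.Int.floordiv j 2) 2, sp) := by
  obtain ⟨k, rfl⟩ := h
  have h1 : PySem.Int.mod (4 * k + 1) 2 = 1 := by
    rw [PySem.Int.mod_eq_emod_of_pos (by omega : (0:Int) < 2)]; omega
  have h2 : PySem.Int.floordiv (4 * k + 1) 2 = 2 * k := by
    rw [PySem.Int.floordiv_eq_ediv_of_pos (by omega : (0:Int) < 2)]; omega
  have h3 : PySem.Int.mod (2 * k) 2 = 0 := by
    rw [PySem.Int.mod_eq_emod_of_pos (by omega : (0:Int) < 2)]; omega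
  simp only [pvItem, h1, h2, h3]
  simp

theorem pvItem_buf (n : Int) (rh : List Int) (sp : Int) (j : Int)
    (h : ∃ k : Int, j = 4 * k + 3) :
    pvItem n rh sp j = ("buf", n - 1 - PySem.Int.floordiv (PySem.Int.floordiv j 2 + 1) 2, sp) := by
  obtain ⟨k, rfl⟩ := h
  have h1 : PySem.Int.mod (4 * k + 3) 2 = 1 := by
    rw [PySem.Int.mod_eq_emod_of_pos (by omega : (0:Int) < 2)]; omega
  have h2 : PySem.Int.floordiv (4 * k + 3) 2 = 2 * k + 1 := by
    rw [PySem.Int.floordiv_eq_ediv_of_pos (by omega : (0:Int) < 2)]; omega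
  have h3 : PySem.Int.mod (2 * k + 1) 2 = 1 := by
    rw [PySem.Int.mod_eq_emod_of_pos (by omega : (0:Int) < 2)]; omega
  simp only [pvItem, h1, h2, h3]
  simp

-- the crosshairs case: the last m transitions of A fill output slots 4n-4m .. 4n-2
theorem pv_cross_eq (n : Int) (row_heights : List Int) (sep_px : Int) (m : Nat) (hm : (m : Int) ≤ n) :
    (PySem.List.pyRange ((m : Int) - 1) (-1) (-1)).flatMap (pvBlockA n row_heights true sep_px)
      = (PySem.List.pyRange (4 * n - 4 * (m : Int)) (4 * n - 1) 1).map (pvItem n row_heights sep_px) := by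
  induction m with
  | zero =>
    rw [PySem.List.pyRange_neg_one_eq_nil (by simp),
        PySem.List.pyRange_one_eq_nil (by push_cast; omega)]
    simp
  | succ k ih =>
    have hc : ((k + 1 : Nat) : Int) = (k : Int) + 1 := by push_cast; ring
    rw [hc] at hm ⊢
    rw [show (k : Int) + 1 - 1 = (k : Int) by ring]
    rw [PySem.List.pyRange_neg_one_cons (by omega)]
    simp only [List.flatMap_cons]
    rw [ih (by omega)]
    set a : Int := 4 * n - 4 * ((k : Int) + 1) with ha
    have e1 : pvItem n row_heights sep_px a
        = ("data", 2 * n - 2 * (k : Int) - 1, PySem.List.pyGetD row_heights (2 * n - 2 * (k : Int) - 1 - 1) 0) := by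
      rw [pvItem_data n row_heights sep_px a ⟨2 * n - 2 * (k : Int) - 2, by omega⟩]
      have : PySem.Int.floordiv a 2 = 2 * n - 2 * (k : Int) - 2 := by
        rw [PySem.Int.floordiv_eq_ediv_of_pos (by omega : (0:Int) < 2)]; omega
      rw [this]
      norm_num
      exact ⟨by omega, by rw [show (2 * n - 2 * (k : Int) - 1 - 1 : Int) = 2 * n - 2 * (k : Int) - 2 from by ring]⟩
    have e2 : pvItem n row_heights sep_px (a + 1) = ("sep", (k : Int), sep_px) := by
      rw [pvItem_sep n row_heights sep_px (a + 1) ⟨n - (k : Int) - 1, by omega⟩]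
      have h2 : PySem.Int.floordiv (a + 1) 2 = 2 * n - 2 * (k : Int) - 2 := by
        rw [PySem.Int.floordiv_eq_ediv_of_pos (by omega : (0:Int) < 2)]; omega
      have h4 : PySem.Int.floordiv (2 * n - 2 * (k : Int) - 2) 2 = n - (k : Int) - 1 := by
        rw [PySem.Int.floordiv_eq_ediv_of_pos (by omega : (0:Int) < 2)]; omega
      rw [h2, h4]; norm_num
    have e3 : pvItem n row_heights sep_px (a + 1 + 1)
        = ("data", 2 * n - 2 * (k : Int), PySem.List.pyGetD row_heights (2 * n - 2 * (k : Int) - 1) 0) := by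
      rw [pvItem_data n row_heights sep_px (a + 1 + 1) ⟨2 * n - 2 * (k : Int) - 1, by omega⟩]
      have : PySem.Int.floordiv (a + 1 + 1) 2 = 2 * n - 2 * (k : Int) - 1 := by
        rw [PySem.Int.floordiv_eq_ediv_of_pos (by omega : (0:Int) < 2)]; omega
      rw [this]; norm_num
    by_cases hk : (0:Int) < (k : Int)
    · -- i = k > 0: block is 4 items; slots a, a+1, a+2, a+3
      have e4 : pvItem n row_heights sep_px (a + 1 + 1 + 1) = ("buf", (k : Int) - 1, sep_px) := by
        rw [pvItem_buf n row_heights sep_px (a + 1 + 1 + 1) ⟨n - (k : Int) - 1, by omega⟩]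
        have h2 : PySem.Int.floordiv (a + 1 + 1 + 1) 2 = 2 * n - 2 * (k : Int) - 1 := by
          rw [PySem.Int.floordiv_eq_ediv_of_pos (by omega : (0:Int) < 2)]; omega
        have h4 : PySem.Int.floordiv (2 * n - 2 * (k : Int) - 1 + 1) 2 = n - (k : Int) := by
          rw [PySem.Int.floordiv_eq_ediv_of_pos (by omega : (0:Int) < 2)]; omega
        rw [h2, h4]; norm_num
      rw [PySem.List.pyRange_one_cons (by omega : a < 4 * n - 1),
          PySem.List.pyRange_one_cons (by omega : a + 1 < 4 * n - 1),
          PySem.List.pyRange_one_cons (by omega : a + 1 + 1 < 4 * n - 1),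
          PySem.List.pyRange_one_cons (by omega : a + 1 + 1 + 1 < 4 * n - 1)]
      simp only [List.map_cons, e1, e2, e3, e4]
      rw [show a + 1 + 1 + 1 + 1 = 4 * n - 4 * (k : Int) by omega]
      have hk' : 0 < k := by omega
      simp [pvBlockA, hk, hk']
    · -- i = k = 0: m = 1, block is 3 items; slots a, a+1, a+2 and the tail range is empty
      have hk0 : k = 0 := by omega
      rw [PySem.List.pyRange_one_cons (by omega : a < 4 * n - 1),
          PySem.List.pyRange_one_cons (by omega : a + 1 < 4 * n - 1),
          PySem.List.pyRange_one_cons (by omega : a + 1 + 1 < 4 * n - 1)]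
      rw [PySem.List.pyRange_one_eq_nil (by omega : 4 * n - 1 ≤ a + 1 + 1 + 1)]
      rw [PySem.List.pyRange_one_eq_nil (show 4 * n - 1 ≤ 4 * n - 4 * (k : Int) by omega)]
      simp only [List.map_cons, List.map_nil, e1, e2, e3]
      simp [pvBlockA, hk0]

-- no crosshairs: the last m transitions of A fill data slots 2n-2m .. 2n-1
theorem pv_plain_eq (n : Int) (row_heights : List Int) (sep_px : Int) (m : Nat) (hm : (m : Int) ≤ n) :
    (PySem.List.pyRange ((m : Int) - 1) (-1) (-1)).flatMap (pvBlockA n row_heights false sep_px)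
      = (PySem.List.pyRange (2 * n - 2 * (m : Int)) (2 * n) 1).map
          (fun r => (("data", r + 1, PySem.List.pyGetD row_heights r 0) : String × Int × Int)) := by
  induction m with
  | zero =>
    rw [PySem.List.pyRange_neg_one_eq_nil (by simp),
        PySem.List.pyRange_one_eq_nil (by push_cast; omega)]
    simp
  | succ k ih =>
    have hc : ((k + 1 : Nat) : Int) = (k : Int) + 1 := by push_cast; ring
    rw [hc] at hm ⊢
    rw [show (k : Int) + 1 - 1 = (k : Int) by ring]
    rw [PySem.List.pyRange_neg_one_cons (by omega)]
    simp only [List.flatMap_cons]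
    rw [ih (by omega)]
    set a : Int := 2 * n - 2 * ((k : Int) + 1) with ha
    rw [PySem.List.pyRange_one_cons (by omega : a < 2 * n),
        PySem.List.pyRange_one_cons (by omega : a + 1 < 2 * n)]
    simp only [List.map_cons]
    rw [show a + 1 + 1 = 2 * n - 2 * (k : Int) by omega]
    simp only [pvBlockA, List.map_cons]
    norm_num
    refine ⟨⟨by omega, ?_⟩, ?_⟩
    · rw [show (2 * n - 2 * (k : Int) - 1 - 1 : Int) = a from by omega]
    · rw [show (2 * n - 2 * (k : Int) - 1 : Int) = a + 1 from by omega]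

-- ===== VERDICT (by name: the statement is the Claim_ definition above) =====
theorem build_row_sequence_py_spec : Claim_equal_build_row_sequence_py := by
  intro n row_heights show_crosshairs sep_px _ _
  unfold Spec_build_row_sequence_py
  rw [pvA_eq_flatMap]
  by_cases hn : 0 ≤ n
  · cases show_crosshairs with
    | true =>
      have := pv_cross_eq n row_heights sep_px n.toNat (by omega)
      rw [Int.toNat_of_nonneg hn] at this
      unfold build_row_sequence_py_alt
      simpa using this
    | false =>
      have := pv_plain_eq n row_heights sep_px n.toNat (by omega)
      rw [Int.toNat_of_nonneg hn] at this
      unfold build_row_sequence_py_alt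
      simpa using this
  · rw [PySem.List.pyRange_neg_one_eq_nil (by omega)]
    unfold build_row_sequence_py_alt
    cases show_crosshairs <;>
      simp [PySem.List.pyRange_one_eq_nil (by omega : (2 * n : Int) ≤ 0),
            PySem.List.pyRange_one_eq_nil (by omega : (4 * n - 1 : Int) ≤ 0)]
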